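-- pv_equiv track=rewrite | github.com/ShanXiPengYuYan/AWL | DataLoader.py | get_spk_utt_info
-- ===== SOURCE A (Python) =====
-- def get_spk_utt_info(labels):
--
--     spk_utt_info = {}
--     pre_label = labels[0]
--     pre_idx = 0
--     for idx, label in enumerate(labels):
--         if pre_label != label:
--             spk_utt_info[pre_label] = (pre_idx, idx-1)
--             pre_idx = idx
--             pre_label = label
--
--     spk_utt_info[pre_label] = (pre_idx, idx)
--
--     return spk_utt_info
-- ===== SOURCE B (Python) =====
-- def get_spk_utt_info(labels):
--     n = len(labels)
--     bounds = [0]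
--     for i in range(1, n):
--         if labels[i] != labels[i - 1]:
--             bounds.append(i)
--     bounds.append(n)
--     info = {}
--     for j in range(len(bounds) - 1):
--         s = bounds[j]
--         info[labels[s]] = (s, bounds[j + 1] - 1)
--     return info
-- ===== Notes on version B (the rewrite author's own statement) =====
-- stated objective: alternative
-- what changed: Replaces A's single-pass pre_label/pre_idx bookkeeping with a two-phase scheme: first collect the run-boundary index list, then a second pass over consecutive boundary pairs emits each run's (start, end) range.
import Mathlib
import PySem

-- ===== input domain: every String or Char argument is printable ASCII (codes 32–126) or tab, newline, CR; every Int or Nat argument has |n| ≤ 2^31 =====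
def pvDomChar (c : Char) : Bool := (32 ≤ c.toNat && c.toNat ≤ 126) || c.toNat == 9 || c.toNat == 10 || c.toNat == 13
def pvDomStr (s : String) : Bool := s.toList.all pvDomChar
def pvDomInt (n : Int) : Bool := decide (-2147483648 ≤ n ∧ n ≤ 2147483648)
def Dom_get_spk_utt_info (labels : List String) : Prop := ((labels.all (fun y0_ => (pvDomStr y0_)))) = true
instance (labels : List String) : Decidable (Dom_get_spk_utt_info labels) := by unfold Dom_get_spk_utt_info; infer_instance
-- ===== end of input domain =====

-- B replaces A's single-pass pre_label/pre_idx bookkeeping with a two-phase pass: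
-- collect the run-boundary index list, then pair consecutive boundaries to emit ranges.

-- ===== PORT A =====
-- A raises IndexError on labels = [] (labels[0]); Pre_ excludes it. On [] this port returns [].
def get_spk_utt_info (labels : List String) : List (String × Int × Int) :=
  match PySem.List.pyGet? labels 0 with
  | none => []
  | some l0 =>
    let st := (PySem.List.enumerate labels 0).foldl
      (fun (acc : PySem.Dict String (Int × Int) × String × Int) (p : Int × String) =>
        if acc.2.1 ≠ p.2 then
          (acc.1.insert acc.2.1 (acc.2.2, p.1 - 1), p.2, p.1)
        else acc)
      (PySem.Dict.empty, l0, 0)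
    (st.1.insert st.2.1 (st.2.2, (labels.length : Int) - 1)).items

-- ===== PORT B =====
def get_spk_utt_info_alt (labels : List String) : List (String × Int × Int) :=
  let n : Int := labels.length
  let bounds := (PySem.List.pyRange 1 n 1).foldl
    (fun bs i =>
      if PySem.List.pyGet? labels i ≠ PySem.List.pyGet? labels (i - 1) then bs ++ [i] else bs)
    [(0 : Int)]
  let bounds := bounds ++ [n]
  let info := (PySem.List.pyRange 0 ((bounds.length : Int) - 1) 1).foldl
    (fun (d : PySem.Dict String (Int × Int)) j =>
      let s := PySem.List.pyGetD bounds j 0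
      d.insert ((PySem.List.pyGet? labels s).getD "") (s, PySem.List.pyGetD bounds (j + 1) 0 - 1))
    PySem.Dict.empty
  info.items

-- ===== PRECONDITION & SPEC =====
-- A (labels[0]) raises IndexError on the empty list; Pre_ excludes exactly that input.
def Pre_get_spk_utt_info (labels : List String) : Prop := labels ≠ []
instance (labels : List String) : Decidable (Pre_get_spk_utt_info labels) := by
  unfold Pre_get_spk_utt_info; infer_instance
def pvWitness_get_spk_utt_info : List String := ["a", "a", "b"]

def Spec_get_spk_utt_info (labels : List String) (out : List (String × Int × Int)) : Prop := out = get_spk_utt_info_alt labels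
instance (labels : List String) (out : List (String × Int × Int)) : Decidable (Spec_get_spk_utt_info labels out) := by unfold Spec_get_spk_utt_info; infer_instance

-- ===== CLAIM (what is proved, stated in full; the proofs are below) =====
def Claim_equal_get_spk_utt_info : Prop := ∀ (labels : List String), Dom_get_spk_utt_info labels → Pre_get_spk_utt_info labels → Spec_get_spk_utt_info labels (get_spk_utt_info labels)

-- ===== LEMMAS AND PROOFS =====

-- Canonical run decomposition: the (label, start, end) triples of contiguous runs,
-- scanning the suffix xs that starts at absolute index k, with current run (pre, pi).
def runList (pre : String) (pi : Int) (k : Nat) : List String → List (String × Int × Int)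
  | [] => [(pre, pi, (k : Int) - 1)]
  | x :: xs =>
    if pre ≠ x then (pre, pi, (k : Int) - 1) :: runList x (k : Int) (k + 1) xs
    else runList pre pi (k + 1) xs

def inserts (d : PySem.Dict String (Int × Int)) (l : List (String × Int × Int)) :
    PySem.Dict String (Int × Int) :=
  l.foldl (fun d t => d.insert t.1 t.2) d

-- interior run-boundary indices of the suffix xs (absolute index k, previous label pre)
def cuts (pre : String) (k : Nat) : List String → List Nat
  | [] => []
  | x :: xs => if pre ≠ x then k :: cuts x (k + 1) xs else cuts pre (k + 1) xs

lemma get_of_drop (labels : List String) (k : Nat) (x : String) (xs : List String)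
    (h : labels.drop k = x :: xs) : PySem.List.pyGet? labels (k : Int) = some x := by
  rw [PySem.List.pyGet?_natCast]
  have h0 : (labels.drop k)[0]? = labels[k + 0]? := List.getElem?_drop
  rw [h] at h0
  simpa using h0.symm

lemma drop_succ_of_drop (labels : List String) (k : Nat) (x : String) (xs : List String)
    (h : labels.drop k = x :: xs) : labels.drop (k + 1) = xs := by
  rw [← List.tail_drop, h]
  rfl

lemma len_of_drop_cons (labels : List String) (k : Nat) (x : String) (xs : List String)
    (h : labels.drop k = x :: xs) : k < labels.length := by
  have := congrArg List.length h
  simp at this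
  omega

lemma len_of_drop_nil (labels : List String) (k : Nat)
    (h : labels.drop k = []) (hk : k ≤ labels.length) : k = labels.length := by
  have := congrArg List.length h
  simp at this
  omega

-- A's loop + final flush computes the inserts of the run decomposition.
def stepA (acc : PySem.Dict String (Int × Int) × String × Int) (p : Int × String) :
    PySem.Dict String (Int × Int) × String × Int :=
  if acc.2.1 ≠ p.2 then (acc.1.insert acc.2.1 (acc.2.2, p.1 - 1), p.2, p.1) else acc

def flushA (st : PySem.Dict String (Int × Int) × String × Int) (last : Int) :
    PySem.Dict String (Int × Int) :=
  st.1.insert st.2.1 (st.2.2, last)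

lemma A_run (xs : List String) : ∀ (j : Nat) (d : PySem.Dict String (Int × Int))
    (pre : String) (pi : Int),
    flushA ((PySem.List.enumerate xs (j : Int)).foldl stepA (d, pre, pi))
        (((j : Int) + xs.length) - 1)
    = inserts d (runList pre pi j xs) := by
  induction xs with
  | nil =>
    intro j d pre pi
    simp [PySem.List.enumerate_nil, runList, inserts, flushA]
  | cons x xs ih =>
    intro j d pre pi
    rw [PySem.List.enumerate_cons]
    simp only [List.foldl_cons]
    have harith : ((j : Int) + ((x :: xs).length : Int)) - 1
        = (((j + 1 : Nat) : Int) + (xs.length : Int)) - 1 := by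
      simp only [List.length_cons]; push_cast; ring
    by_cases h : pre = x
    · subst h
      rw [show stepA (d, pre, pi) ((j : Int), pre) = (d, pre, pi) by simp [stepA]]
      rw [runList, if_neg (by simp)]
      rw [harith, show ((j : Int) + 1) = ((j + 1 : Nat) : Int) by push_cast; ring]
      exact ih (j + 1) d pre pi
    · rw [show stepA (d, pre, pi) ((j : Int), x)
          = (d.insert pre (pi, (j : Int) - 1), x, (j : Int)) by
        simp [stepA]; intro hc; exact absurd hc h]
      rw [runList, if_pos h]
      rw [harith, show ((j : Int) + 1) = ((j + 1 : Nat) : Int) by push_cast; ring]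
      have h2 := ih (j + 1) (d.insert pre (pi, (j : Int) - 1)) x ((j : Nat) : Int)
      simp only [inserts, List.foldl_cons] at h2 ⊢
      exact h2

-- pairFold: structural form of B's emit loop over consecutive boundary pairs
def pairFold (labels : List String) (d : PySem.Dict String (Int × Int)) :
    List Int → PySem.Dict String (Int × Int)
  | [] => d
  | [_] => d
  | b :: b' :: t =>
    pairFold labels (d.insert ((PySem.List.pyGet? labels b).getD "") (b, b' - 1)) (b' :: t)

-- the index loop over j ∈ [0, len-1) reading bs[j], bs[j+1] is pairFold
lemma pyGetD_cons_cast_succ (b : Int) (t : List Int) (j : Nat) :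
    PySem.List.pyGetD (b :: t) ((j : Int) + 1) 0 = PySem.List.pyGetD t (j : Int) 0 := by
  rw [show ((j : Int) + 1) = ((j + 1 : Nat) : Int) by push_cast; ring]
  rw [PySem.List.pyGetD_natCast, PySem.List.pyGetD_natCast]
  rfl

lemma pairFold_nat (labels : List String) : ∀ (bs : List Int) (d : PySem.Dict String (Int × Int)),
    (List.range (bs.length - 1)).foldl
      (fun d (j : Nat) =>
        d.insert ((PySem.List.pyGet? labels (PySem.List.pyGetD bs (j : Int) 0)).getD "")
          (PySem.List.pyGetD bs (j : Int) 0, PySem.List.pyGetD bs ((j : Int) + 1) 0 - 1)) d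
    = pairFold labels d bs := by
  intro bs
  match bs with
  | [] => intro d; simp [pairFold]
  | [b] => intro d; simp [pairFold]
  | b :: b' :: t =>
    intro d
    simp only [List.length_cons, Nat.add_sub_cancel]
    rw [List.range_succ_eq_map]
    simp only [List.foldl_cons, List.foldl_map]
    have hbody : (fun (d : PySem.Dict String (Int × Int)) (j : Nat) =>
        d.insert ((PySem.List.pyGet? labels (PySem.List.pyGetD (b :: b' :: t) ((Nat.succ j : Nat) : Int) 0)).getD "")
          (PySem.List.pyGetD (b :: b' :: t) ((Nat.succ j : Nat) : Int) 0,
           PySem.List.pyGetD (b :: b' :: t) (((Nat.succ j : Nat) : Int) + 1) 0 - 1))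
        = (fun (d : PySem.Dict String (Int × Int)) (j : Nat) =>
        d.insert ((PySem.List.pyGet? labels (PySem.List.pyGetD (b' :: t) (j : Int) 0)).getD "")
          (PySem.List.pyGetD (b' :: t) (j : Int) 0,
           PySem.List.pyGetD (b' :: t) ((j : Int) + 1) 0 - 1)) := by
      funext d j
      rw [show ((Nat.succ j : Nat) : Int) = ((j : Int) + 1) by push_cast; ring]
      rw [pyGetD_cons_cast_succ b (b' :: t) j]
      rw [show (((j : Int) + 1) + 1) = (((j + 1 : Nat) : Int) + 1) by push_cast; ring]
      rw [pyGetD_cons_cast_succ b (b' :: t) (j + 1)]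
      rw [show (((j + 1 : Nat)) : Int) = ((j : Int) + 1) by push_cast; ring]
    rw [hbody]
    have e0 : PySem.List.pyGetD (b :: b' :: t) (((0 : Nat) : Int)) 0 = b := by
      rw [PySem.List.pyGetD_natCast]; rfl
    have e1 : PySem.List.pyGetD (b :: b' :: t) (((0 : Nat) : Int) + 1) 0 = b' := by
      rw [pyGetD_cons_cast_succ b (b' :: t) 0, PySem.List.pyGetD_natCast]; rfl
    rw [e0, e1]
    have := pairFold_nat labels (b' :: t)
      (d.insert ((PySem.List.pyGet? labels b).getD "") (b, b' - 1))
    simp only [List.length_cons, Nat.add_sub_cancel] at this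
    rw [this]
    rfl

-- named forms of B's two loops (definitionally equal to the port's let-bound loops)
def boundsB (labels : List String) : List Int :=
  (PySem.List.pyRange 1 (labels.length : Int) 1).foldl
    (fun bs i =>
      if PySem.List.pyGet? labels i ≠ PySem.List.pyGet? labels (i - 1) then bs ++ [i] else bs)
    [(0 : Int)]

def emitB (labels : List String) (bs : List Int) : PySem.Dict String (Int × Int) :=
  (PySem.List.pyRange 0 ((bs.length : Int) - 1) 1).foldl
    (fun (d : PySem.Dict String (Int × Int)) j =>
      let s := PySem.List.pyGetD bs j 0
      d.insert ((PySem.List.pyGet? labels s).getD "") (s, PySem.List.pyGetD bs (j + 1) 0 - 1))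
    PySem.Dict.empty

-- B's pyRange emit loop equals pairFold
lemma emit_pairFold (labels : List String) (bs : List Int) (d : PySem.Dict String (Int × Int)) :
    (PySem.List.pyRange 0 ((bs.length : Int) - 1) 1).foldl
      (fun (d : PySem.Dict String (Int × Int)) j =>
        let s := PySem.List.pyGetD bs j 0
        d.insert ((PySem.List.pyGet? labels s).getD "") (s, PySem.List.pyGetD bs (j + 1) 0 - 1)) d
    = pairFold labels d bs := by
  match bs with
  | [] =>
    simp only [List.length_nil, Nat.cast_zero]
    rw [PySem.List.pyRange_one_eq_nil (by norm_num)]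
    simp [pairFold]
  | b :: t =>
    have hlen : ((b :: t).length : Int) - 1 = ((t.length : Nat) : Int) := by
      simp only [List.length_cons]; push_cast; ring
    rw [hlen, PySem.List.pyRange_zero_natCast]
    rw [List.foldl_map]
    rw [← pairFold_nat labels (b :: t) d]
    simp only [List.length_cons, Nat.add_sub_cancel]

lemma emitB_eq (labels : List String) (bs : List Int) :
    emitB labels bs = pairFold labels PySem.Dict.empty bs :=
  emit_pairFold labels bs PySem.Dict.empty

-- pairFold over the boundary list of a suffix = inserts of its run decomposition
lemma pairFold_runList (labels : List String) : ∀ (xs : List String) (pre : String)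
    (pi : Int) (k : Nat) (d : PySem.Dict String (Int × Int)),
    labels.drop k = xs → k ≤ labels.length →
    PySem.List.pyGet? labels pi = some pre →
    pairFold labels d ((pi :: (cuts pre k xs).map (Nat.cast)) ++ [(labels.length : Int)])
    = inserts d (runList pre pi k xs) := by
  intro xs
  induction xs with
  | nil =>
    intro pre pi k d hdrop hk hpre
    have hkn : k = labels.length := len_of_drop_nil labels k hdrop hk
    simp only [cuts, List.map_nil, List.nil_append, List.cons_append, List.nil_append]
    simp [pairFold, hpre, inserts, runList, hkn]
  | cons x xs ih =>
    intro pre pi k d hdrop hk hpre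
    have hget : PySem.List.pyGet? labels (k : Int) = some x := get_of_drop labels k x xs hdrop
    have hdrop' : labels.drop (k + 1) = xs := drop_succ_of_drop labels k x xs hdrop
    rw [cuts]
    by_cases h : pre = x
    · subst h
      rw [if_neg (by simp), runList, if_neg (by simp)]
      exact ih pre pi (k + 1) d hdrop' (by have := len_of_drop_cons labels k pre xs hdrop; omega) hpre
    · rw [if_pos h, runList, if_pos h]
      simp only [List.map_cons, List.cons_append]
      rw [pairFold]
      simp only [hpre, Option.getD_some]
      have := ih x (k : Int) (k + 1) (d.insert pre (pi, (k : Int) - 1)) hdrop'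
        (by have := len_of_drop_cons labels k x xs hdrop; omega) hget
      simp only [List.cons_append] at this
      rw [this]
      simp [inserts]

-- interior boundaries: B's first loop computes cuts
lemma filter_cuts (labels : List String) : ∀ (xs : List String) (pre : String) (k : Nat),
    labels.drop k = xs → 1 ≤ k →
    PySem.List.pyGet? labels ((k : Int) - 1) = some pre →
    (PySem.List.pyRange (k : Int) (labels.length : Int) 1).filter
      (fun i => decide (PySem.List.pyGet? labels i ≠ PySem.List.pyGet? labels (i - 1)))
    = (cuts pre k xs).map (Nat.cast) := by
  intro xs
  induction xs with
  | nil =>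
    intro pre k hdrop h1 hpre
    by_cases hk : k ≤ labels.length
    · have hkn : k = labels.length := len_of_drop_nil labels k hdrop hk
      rw [hkn]
      simp [PySem.List.pyRange_one_eq_nil le_rfl, cuts]
    · rw [PySem.List.pyRange_one_eq_nil
        (by exact_mod_cast Nat.le_of_lt (Nat.lt_of_not_le hk))]
      simp [cuts]
  | cons x xs ih =>
    intro pre k hdrop h1 hpre
    have hklt : k < labels.length := len_of_drop_cons labels k x xs hdrop
    have hget : PySem.List.pyGet? labels (k : Int) = some x := get_of_drop labels k x xs hdrop
    have hdrop' : labels.drop (k + 1) = xs := drop_succ_of_drop labels k x xs hdrop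
    rw [PySem.List.pyRange_one_cons (by exact_mod_cast hklt)]
    rw [List.filter_cons]
    rw [cuts]
    have hpre' : PySem.List.pyGet? labels (((k + 1 : Nat) : Int) - 1) = some x := by
      rw [show (((k + 1 : Nat) : Int) - 1) = (k : Int) by push_cast; ring]
      exact hget
    have ihx := ih x (k + 1) hdrop' (by omega) hpre'
    rw [show ((k : Int) + 1) = ((k + 1 : Nat) : Int) by push_cast; ring]
    by_cases h : pre = x
    · subst h
      rw [if_neg (by simp [hget, hpre])]
      rw [if_neg (by simp)]
      exact ihx
    · rw [if_pos (by
        simp only [hget, hpre, decide_eq_true_eq, ne_eq, Option.some.injEq]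
        exact fun hh => h hh.symm)]
      rw [if_pos h]
      simp only [List.map_cons]
      rw [ihx]

-- ===== VERDICT (by name: the statement is the Claim_ definition above) =====
theorem get_spk_utt_info_spec : Claim_equal_get_spk_utt_info := by
  intro labels _hdom hpre
  unfold Spec_get_spk_utt_info
  match labels, hpre with
  | [], h => exact absurd rfl h
  | l0 :: rest, _ =>
    have hA : get_spk_utt_info (l0 :: rest)
        = (flushA ((PySem.List.enumerate (l0 :: rest) 0).foldl stepA
            (PySem.Dict.empty, l0, 0)) (((l0 :: rest).length : Int) - 1)).items := by
      unfold get_spk_utt_info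
      rw [PySem.List.pyGet?_zero_cons]
      rfl
    have hA2 : get_spk_utt_info (l0 :: rest)
        = (inserts PySem.Dict.empty (runList l0 0 1 rest)).items := by
      rw [hA, PySem.List.enumerate_cons]
      simp only [List.foldl_cons]
      rw [show stepA (PySem.Dict.empty, l0, 0) (0, l0) = (PySem.Dict.empty, l0, 0) by
        simp [stepA]]
      rw [show (((l0 :: rest).length : Int) - 1) = ((((1 : Nat)) : Int) + (rest.length : Int)) - 1 by
        simp only [List.length_cons]; push_cast; ring]
      rw [show ((0 : Int) + 1) = (((1 : Nat)) : Int) by norm_num]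
      rw [A_run rest 1 PySem.Dict.empty l0 0]
    have hbounds : boundsB (l0 :: rest) = (0 : Int) :: (cuts l0 1 rest).map (Nat.cast) := by
      unfold boundsB
      rw [PySem.List.foldl_append_ite_eq_filter]
      have hf := filter_cuts (l0 :: rest) rest l0 1 rfl le_rfl
        (by rw [show (((1 : Nat) : Int) - 1) = (0 : Int) by norm_num]
            exact PySem.List.pyGet?_zero_cons l0 rest)
      rw [Nat.cast_one] at hf
      rw [hf]
      rfl
    have hB1 : get_spk_utt_info_alt (l0 :: rest)
        = (emitB (l0 :: rest) (boundsB (l0 :: rest) ++ [((l0 :: rest).length : Int)])).items := rfl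
    rw [hA2, hB1, hbounds, emitB_eq]
    rw [pairFold_runList (l0 :: rest) rest l0 0 1 PySem.Dict.empty rfl (by simp)
      (PySem.List.pyGet?_zero_cons l0 rest)]
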